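-- pv_equiv track=rewrite | github.com/Mehran12121/fast-counter | counter.py | count_reads
-- ===== SOURCE A (Python) =====
-- import bisect
--
-- def count_reads(reads, genes):
--     counts = {}
--
--     gene_starts = {}
--     gene_data = {}
--
--     # prepare sorted data
--     for chrom in genes:
--         sorted_genes = sorted(genes[chrom], key=lambda x: x[0])
--
--         gene_starts[chrom] = [g[0] for g in sorted_genes]
--         gene_data[chrom] = sorted_genes
--
--         for _, _, gene_id in sorted_genes:
--             counts[gene_id] = 0
--
--     # binary search counting
--     for chrom, pos in reads:
--         if chrom not in gene_data:
--             continue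
--
--         starts = gene_starts[chrom]
--         genes_list = gene_data[chrom]
--
--         # find index using binary search
--         idx = bisect.bisect_right(starts, pos) - 1
--
--         if idx >= 0:
--             start, end, gene_id = genes_list[idx]
--
--             if start <= pos <= end:
--                 counts[gene_id] += 1
--
--     return counts
-- ===== SOURCE B (Python) =====
-- def count_reads(reads, genes):
--     # Gene-centric counting: instead of binary-searching a gene per read, pair each
--     # sorted gene with the next gene's start and count, per gene, the reads on its
--     # chromosome that fall in [start, end] and before the next start (the same reads
--     # A assigns to it via bisect: only the nearest-start gene is credited).
--     chrom_genes = [(chrom, sorted(glist, key=lambda x: x[0]))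
--                    for chrom, glist in genes.items()]
--     counts = dict.fromkeys(
--         (gid for _, sg in chrom_genes for _, _, gid in sg), 0)
--     for chrom, sg in chrom_genes:
--         positions = [p for c, p in reads if c == chrom]
--         nexts = [g[0] for g in sg[1:]] + [None]
--         for (start, end, gid), nxt in zip(sg, nexts):
--             counts[gid] += sum(1 for p in positions
--                                if start <= p <= end and (nxt is None or p < nxt))
--     return counts
-- ===== Notes on version B (the rewrite author's own statement) =====
-- stated objective: alternative
-- what changed: B inverts the loop structure: instead of binary-searching the candidate gene for each read, it pairs each sorted gene with the next gene's start and counts, gene by gene, the reads of that chromosome lying in [start,end] and before the next start; per-key totals agree because each read is credited to at most one gene.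
import Mathlib
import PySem

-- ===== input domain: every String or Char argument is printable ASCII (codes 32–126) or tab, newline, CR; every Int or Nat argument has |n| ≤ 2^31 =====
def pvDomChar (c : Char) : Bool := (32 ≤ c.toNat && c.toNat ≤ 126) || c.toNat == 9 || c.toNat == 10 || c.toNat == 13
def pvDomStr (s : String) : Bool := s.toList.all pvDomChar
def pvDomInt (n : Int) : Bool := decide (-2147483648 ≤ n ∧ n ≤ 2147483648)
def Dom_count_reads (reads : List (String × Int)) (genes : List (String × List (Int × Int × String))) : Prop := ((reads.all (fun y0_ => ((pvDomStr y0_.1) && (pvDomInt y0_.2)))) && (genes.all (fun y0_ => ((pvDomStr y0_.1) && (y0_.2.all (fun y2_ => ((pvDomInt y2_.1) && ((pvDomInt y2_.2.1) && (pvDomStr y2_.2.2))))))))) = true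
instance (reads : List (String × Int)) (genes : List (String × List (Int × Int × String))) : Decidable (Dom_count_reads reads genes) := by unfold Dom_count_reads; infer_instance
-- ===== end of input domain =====

-- B inverts the loops: instead of binary-searching the candidate gene per read, it counts
-- per gene the reads in [start, end] lying before the next gene's start (alternative, not faster).

-- ===== PORT A =====
-- one iteration of A's preparation loop: state = (counts, gene_starts, gene_data)
def aPrep (st : PySem.Dict String Int × PySem.Dict String (List Int) × PySem.Dict String (List (Int × Int × String)))
    (cg : String × List (Int × Int × String)) :
    PySem.Dict String Int × PySem.Dict String (List Int) × PySem.Dict String (List (Int × Int × String)) :=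
  let sorted_genes := PySem.List.sorted cg.2 (fun g => g.1)
  let counts := sorted_genes.foldl (fun c g => c.insert g.2.2 (0 : Int)) st.1
  (counts, st.2.1.insert cg.1 (sorted_genes.map (fun g => g.1)), st.2.2.insert cg.1 sorted_genes)

-- one iteration of A's counting loop (binary search via bisect_right)
def aStep (gene_starts : PySem.Dict String (List Int)) (gene_data : PySem.Dict String (List (Int × Int × String)))
    (counts : PySem.Dict String Int) (r : String × Int) : PySem.Dict String Int :=
  match gene_data.get? r.1 with
  | none => counts
  | some genes_list =>
    let starts := (gene_starts.get? r.1).getD []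
    let idx : Int := (PySem.List.bisectRight starts r.2 : Int) - 1
    if 0 ≤ idx then
      match PySem.List.pyGet? genes_list idx with
      | none => counts   -- unreachable: 0 ≤ idx < len(genes_list)
      | some g =>
        if g.1 ≤ r.2 ∧ r.2 ≤ g.2.1 then counts.insert g.2.2 (counts.getD g.2.2 0 + 1) else counts
    else counts

def count_reads (reads : List (String × Int)) (genes : List (String × List (Int × Int × String))) : List (String × Int) :=
  let genesD := PySem.Dict.ofList genes
  let prep := genesD.items.foldl aPrep (PySem.Dict.empty, PySem.Dict.empty, PySem.Dict.empty)
  (reads.foldl (aStep prep.2.1 prep.2.2) prep.1).items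

-- ===== PORT B =====
-- the condition of B's per-gene generator: start <= p <= end and (nxt is None or p < nxt)
def bHit (g : Int × Int × String) (nxt : Option Int) (p : Int) : Bool :=
  decide (g.1 ≤ p) && decide (p ≤ g.2.1) && (match nxt with | none => true | some h => decide (p < h))

-- body of B's 'for chrom, sg in chrom_genes' loop
def bChrom (reads : List (String × Int)) (counts : PySem.Dict String Int)
    (cs : String × List (Int × Int × String)) : PySem.Dict String Int :=
  let positions := (reads.filter (fun r => r.1 == cs.1)).map (fun r => r.2)
  let nexts : List (Option Int) := (cs.2.drop 1).map (fun g => some g.1) ++ [none]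
  (cs.2.zip nexts).foldl
    (fun counts gn =>
      counts.insert gn.1.2.2 (counts.getD gn.1.2.2 0 + ((positions.countP (fun p => bHit gn.1 gn.2 p) : Nat) : Int)))
    counts

def count_reads_alt (reads : List (String × Int)) (genes : List (String × List (Int × Int × String))) : List (String × Int) :=
  let chromGenes := (PySem.Dict.ofList genes).items.map (fun cg => (cg.1, PySem.List.sorted cg.2 (fun g => g.1)))
  let counts0 : PySem.Dict String Int :=
    PySem.Dict.ofList (chromGenes.flatMap (fun cs => cs.2.map (fun g => (g.2.2, (0 : Int)))))
  (chromGenes.foldl (bChrom reads) counts0).items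

-- ===== PRECONDITION & SPEC =====
def Spec_count_reads (reads : List (String × Int)) (genes : List (String × List (Int × Int × String))) (out : List (String × Int)) : Prop := out = count_reads_alt reads genes
instance (reads : List (String × Int)) (genes : List (String × List (Int × Int × String))) (out : List (String × Int)) : Decidable (Spec_count_reads reads genes out) := by unfold Spec_count_reads; infer_instance

-- ===== CLAIM (what is proved, stated in full; the proofs are below) =====
def Claim_equal_count_reads : Prop := ∀ (reads : List (String × Int)) (genes : List (String × List (Int × Int × String))), Dom_count_reads reads genes → Spec_count_reads reads genes (count_reads reads genes)


-- ===== LEMMAS AND PROOFS =====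

-- A's per-chromosome binary-search result, as a function of the sorted list
def tgtsg (sg : List (Int × Int × String)) (p : Int) : Option String :=
  if 0 ≤ (PySem.List.bisectRight (sg.map (fun g => g.1)) p : Int) - 1 then
    match PySem.List.pyGet? sg ((PySem.List.bisectRight (sg.map (fun g => g.1)) p : Int) - 1) with
    | none => none
    | some g => if g.1 ≤ p ∧ p ≤ g.2.1 then some g.2.2 else none
  else none

-- the gene A's binary search credits a read with, as an optional gene id
def tgt (gd : PySem.Dict String (List (Int × Int × String))) (r : String × Int) : Option String :=
  match gd.get? r.1 with
  | none => none
  | some sg => tgtsg sg r.2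

-- B's list of next-gene starts, named for the proofs
def nexts (sg : List (Int × Int × String)) : List (Option Int) :=
  (sg.drop 1).map (fun g => some g.1) ++ [none]

-- the counts component of A's preparation fold, as a plain fold
lemma aPrep_fst (l : List (String × List (Int × Int × String)))
    (st : PySem.Dict String Int × PySem.Dict String (List Int) × PySem.Dict String (List (Int × Int × String))) :
    (l.foldl aPrep st).1 =
      l.foldl (fun c cg => (PySem.List.sorted cg.2 (fun g => g.1)).foldl (fun c g => c.insert g.2.2 (0 : Int)) c) st.1 := by
  induction l generalizing st with
  | nil => rfl
  | cons x xs ih => simp [List.foldl_cons, ih, aPrep]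

-- the gene_data component of A's preparation fold, as a plain fold
lemma aPrep_data (l : List (String × List (Int × Int × String)))
    (st : PySem.Dict String Int × PySem.Dict String (List Int) × PySem.Dict String (List (Int × Int × String))) :
    (l.foldl aPrep st).2.2 =
      l.foldl (fun d cg => d.insert cg.1 (PySem.List.sorted cg.2 (fun g => g.1))) st.2.2 := by
  induction l generalizing st with
  | nil => rfl
  | cons x xs ih => simp [List.foldl_cons, ih, aPrep]

-- gene_starts is the key-projection of gene_data, pointwise through get?
lemma aPrep_starts_rel (l : List (String × List (Int × Int × String)))
    (st : PySem.Dict String Int × PySem.Dict String (List Int) × PySem.Dict String (List (Int × Int × String)))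
    (h : ∀ c, st.2.1.get? c = (st.2.2.get? c).map (List.map (fun g => g.1))) :
    ∀ c, (l.foldl aPrep st).2.1.get? c = ((l.foldl aPrep st).2.2.get? c).map (List.map (fun g => g.1)) := by
  induction l generalizing st with
  | nil => exact h
  | cons x xs ih =>
    refine ih _ (fun c => ?_)
    simp only [aPrep, PySem.Dict.get?_insert]
    by_cases hc : c = x.1 <;> simp [hc, h c]

-- A's counting step is: bump the key tgt names (if any) by one
lemma aStep_eq_tgt (gs : PySem.Dict String (List Int)) (gd : PySem.Dict String (List (Int × Int × String)))
    (hrel : ∀ c, gs.get? c = (gd.get? c).map (List.map (fun g => g.1)))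
    (counts : PySem.Dict String Int) (r : String × Int) :
    aStep gs gd counts r =
      match tgt gd r with
      | none => counts
      | some k => counts.insert k (counts.getD k 0 + 1) := by
  unfold aStep tgt tgtsg
  cases h : gd.get? r.1 with
  | none => rfl
  | some sg =>
    have h1 := hrel r.1
    rw [h] at h1
    simp only [h1, Option.map_some, Option.getD_some]
    by_cases hidx : (0 : Int) ≤ (PySem.List.bisectRight (sg.map (fun g => g.1)) r.2 : Int) - 1
    · simp only [if_pos hidx]
      cases hg : PySem.List.pyGet? sg ((PySem.List.bisectRight (sg.map (fun g => g.1)) r.2 : Int) - 1) with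
      | none => rfl
      | some g => by_cases he : g.1 ≤ r.2 ∧ r.2 ≤ g.2.1 <;> simp [he]
    · rw [if_neg hidx, if_neg hidx]

lemma foldl_fun_ext {α β : Type} (f g : α → β → α) (l : List β) (a : α)
    (h : ∀ acc x, f acc x = g acc x) : l.foldl f a = l.foldl g a := by
  induction l generalizing a with
  | nil => rfl
  | cons x xs ih => rw [List.foldl_cons, List.foldl_cons, h, ih]

-- countP of a disjunction of disjoint tests adds
lemma countP_or_disjoint {α : Type} (xs : List α) (p q : α → Bool)
    (h : ∀ x, p x = true → q x = false) :
    xs.countP (fun x => p x || q x) = xs.countP p + xs.countP q := by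
  induction xs with
  | nil => rfl
  | cons a t ih =>
    simp only [List.countP_cons, ih]
    by_cases hp : p a = true
    · simp [hp, h a hp]
      omega
    · simp only [Bool.not_eq_true] at hp
      by_cases hq : q a = true <;> simp [hp, hq] <;> omega

-- a sum of per-test counts over pairwise-disjoint tests is the count of "any"
lemma sum_countP_disjoint {α β : Type} (ys : List β) (xs : List α) (Q : β → α → Bool)
    (h : ys.Pairwise (fun y y' => ∀ x, Q y x = true → Q y' x = false)) :
    (ys.map (fun y => (xs.countP (Q y) : Int))).sum = (xs.countP (fun x => ys.any (fun y => Q y x)) : Int) := by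
  induction ys with
  | nil => simp
  | cons y t ih =>
    rw [List.pairwise_cons] at h
    have hdisj : ∀ x, Q y x = true → (t.any (fun y' => Q y' x)) = false := by
      intro x hx
      rw [List.any_eq_false]
      intro y' hy'
      simp [h.1 y' hy' x hx]
    have hsplit : xs.countP (fun x => Q y x || t.any (fun y' => Q y' x)) = xs.countP (Q y) + xs.countP (fun x => t.any (fun y' => Q y' x)) :=
      countP_or_disjoint xs _ _ hdisj
    simp only [List.map_cons, List.sum_cons, ih h.2, List.any_cons, hsplit]
    push_cast
    ring

-- A-side: value of the bump fold
lemma foldl_bump_getD (tg : (String × Int) → Option String)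
    (reads : List (String × Int)) (c : PySem.Dict String Int) (k : String) :
    (reads.foldl (fun counts r =>
        match tg r with
        | none => counts
        | some k' => counts.insert k' (counts.getD k' 0 + 1)) c).getD k 0 =
      c.getD k 0 + (reads.countP (fun r => tg r == some k) : Int) := by
  induction reads generalizing c with
  | nil => simp
  | cons a t ih =>
    rw [List.foldl_cons, List.countP_cons, ih]
    cases h : tg a with
    | none => simp [h]
    | some k' =>
      by_cases hk : k' = k
      · subst hk
        simp [h, PySem.Dict.getD_insert]
        omega
      · simp [h, PySem.Dict.getD_insert, hk, Ne.symm hk]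

-- A-side: the bump fold does not create keys when every target is already a key
lemma foldl_bump_keys (tg : (String × Int) → Option String)
    (reads : List (String × Int)) (c : PySem.Dict String Int)
    (hmem : ∀ r k, tg r = some k → k ∈ c.keys) :
    (reads.foldl (fun counts r =>
        match tg r with
        | none => counts
        | some k' => counts.insert k' (counts.getD k' 0 + 1)) c).keys = c.keys := by
  induction reads generalizing c with
  | nil => rfl
  | cons a t ih =>
    rw [List.foldl_cons]
    cases h : tg a with
    | none =>
      simp only
      exact ih c hmem
    | some k' =>
      simp only
      have hk := hmem a k' h
      have hkeys : (c.insert k' (c.getD k' 0 + 1)).keys = c.keys :=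
        PySem.Dict.keys_insert_of_contains _ _ ((PySem.Dict.contains_iff_mem_keys _ _).mpr hk)
      rw [ih _ (fun r k hr => by rw [hkeys]; exact hmem r k hr), hkeys]

-- B-side: value of an insert-add fold over any list
lemma foldl_insert_add_getD {γ : Type} (zs : List γ) (key : γ → String) (f : γ → Int)
    (c : PySem.Dict String Int) (k : String) :
    (zs.foldl (fun c gn => c.insert (key gn) (c.getD (key gn) 0 + f gn)) c).getD k 0 =
      c.getD k 0 + (zs.map (fun gn => if key gn = k then f gn else 0)).sum := by
  induction zs generalizing c with
  | nil => simp
  | cons a t ih =>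
    rw [List.foldl_cons, List.map_cons, List.sum_cons, ih]
    by_cases hk : key a = k
    · rw [hk, if_pos rfl, PySem.Dict.getD_insert, if_pos rfl]
      ring
    · rw [if_neg hk, PySem.Dict.getD_insert, if_neg (Ne.symm hk)]
      ring

-- B-side: keys are preserved when every inserted key is already present
lemma foldl_insert_add_keys {γ : Type} (zs : List γ) (key : γ → String) (f : γ → Int)
    (c : PySem.Dict String Int) (hmem : ∀ gn ∈ zs, key gn ∈ c.keys) :
    (zs.foldl (fun c gn => c.insert (key gn) (c.getD (key gn) 0 + f gn)) c).keys = c.keys := by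
  induction zs generalizing c with
  | nil => rfl
  | cons a t ih =>
    rw [List.foldl_cons]
    have hk := hmem a List.mem_cons_self
    have hkeys : (c.insert (key a) (c.getD (key a) 0 + f a)).keys = c.keys :=
      PySem.Dict.keys_insert_of_contains _ _ ((PySem.Dict.contains_iff_mem_keys _ _).mpr hk)
    rw [ih _ (fun gn hgn => by rw [hkeys]; exact hmem gn (List.mem_cons_of_mem _ hgn)), hkeys]

-- Dict.ofList is the insert fold
lemma ofList_eq_foldl {κ ν : Type} [BEq κ] (ps : List (κ × ν)) :
    PySem.Dict.ofList ps = ps.foldl (fun d p => d.insert p.1 p.2) PySem.Dict.empty := by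
  rfl

lemma length_nexts (sg : List (Int × Int × String)) (h : sg ≠ []) :
    (nexts sg).length = sg.length := by
  have : 1 ≤ sg.length := List.length_pos_iff.mpr h
  simp [nexts]
  omega

lemma length_zip_nexts (sg : List (Int × Int × String)) :
    (sg.zip (nexts sg)).length = sg.length := by
  cases sg with
  | nil => rfl
  | cons a t =>
    rw [List.length_zip, length_nexts _ (by simp)]
    omega

lemma getElem_nexts (sg : List (Int × Int × String)) (i : Nat) (hi : i < sg.length)
    (hlen : (nexts sg).length = sg.length) :
    (nexts sg)[i]'(by omega) = if h : i + 1 < sg.length then some (sg[i+1].1) else none := by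
  by_cases h : i + 1 < sg.length
  · rw [dif_pos h]
    have hmap : ((sg.drop 1).map (fun g => some g.1)).length = sg.length - 1 := by simp
    unfold nexts
    rw [List.getElem_append_left (by omega)]
    rw [List.getElem_map]
    congr 1
    rw [List.getElem_drop]
    simp [Nat.add_comm]
  · rw [dif_neg h]
    have hie : i = sg.length - 1 := by omega
    unfold nexts
    rw [List.getElem_append_right (by simp; omega)]
    simp

-- a firing pair of the zip can only sit at index bisect_right - 1
lemma hit_index (sg : List (Int × Int × String)) (p : Int)
    (hs : sg.Pairwise (fun a b => a.1 ≤ b.1))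
    (i : Nat) (hi : i < sg.length)
    (hlen : (nexts sg).length = sg.length)
    (hhit : bHit sg[i] ((nexts sg)[i]'(by omega)) p = true) :
    0 < PySem.List.bisectRight (sg.map (fun g => g.1)) p ∧
      i = PySem.List.bisectRight (sg.map (fun g => g.1)) p - 1 := by
  obtain ⟨hle, hlt_le, hge_gt⟩ := PySem.List.bisectRight_spec (sg.map (fun g => g.1)) p
    (by rw [List.pairwise_map]; exact hs)
  set n := PySem.List.bisectRight (sg.map (fun g => g.1)) p with hn
  simp only [List.length_map] at hle hlt_le hge_gt
  rw [getElem_nexts sg i hi hlen] at hhit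
  unfold bHit at hhit
  simp only [Bool.and_eq_true, decide_eq_true_eq] at hhit
  have hstart : sg[i].1 ≤ p := hhit.1.1
  have hin : i < n := by
    by_contra hcon
    have := hge_gt i hi (by omega)
    simp only [List.getElem_map] at this
    omega
  refine ⟨by omega, ?_⟩
  by_contra hne
  have hi1 : i + 1 ≤ n - 1 := by omega
  have hi1lt : i + 1 < sg.length := by omega
  rw [dif_pos hi1lt] at hhit
  have hnext : p < sg[i+1].1 := by simpa using hhit.2
  have := hlt_le (i+1) (by omega) (by omega)
  simp only [List.getElem_map] at this
  omega

-- "some pair with this gene id fires" is exactly "A's binary search credits this id"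
lemma any_eq_tgtsg (sg : List (Int × Int × String)) (p : Int) (k : String)
    (hs : sg.Pairwise (fun a b => a.1 ≤ b.1)) :
    ((sg.zip (nexts sg)).any (fun gn => (gn.1.2.2 == k) && bHit gn.1 gn.2 p)) =
      (tgtsg sg p == some k) := by
  obtain ⟨hle, hlt_le, hge_gt⟩ := PySem.List.bisectRight_spec (sg.map (fun g => g.1)) p
    (by rw [List.pairwise_map]; exact hs)
  set n := PySem.List.bisectRight (sg.map (fun g => g.1)) p with hn
  simp only [List.length_map] at hle hlt_le hge_gt
  rcases List.eq_nil_or_concat sg with hnil | ⟨_, _, hcons⟩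
  · subst hnil
    simp [tgtsg, PySem.List.bisectRight]
  have hne : sg ≠ [] := by rw [hcons]; simp
  have hlen : (nexts sg).length = sg.length := length_nexts sg hne
  have hzlen : (sg.zip (nexts sg)).length = sg.length := length_zip_nexts sg
  by_cases hn0 : 0 < n
  · have hn1 : n - 1 < sg.length := by omega
    have hidx : (0:Int) ≤ (n:Int) - 1 := by omega
    have hcast : ((n:Int) - 1) = ((n - 1 : Nat) : Int) := by omega
    have hget : PySem.List.pyGet? sg ((n:Int) - 1) = some sg[n-1] := by
      rw [hcast, PySem.List.pyGet?_natCast, List.getElem?_eq_getElem hn1]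
    have hstart : sg[n-1].1 ≤ p := by
      have := hlt_le (n-1) hn1 (by omega)
      simpa using this
    have htg : tgtsg sg p = if sg[n-1].1 ≤ p ∧ p ≤ sg[n-1].2.1 then some sg[n-1].2.2 else none := by
      unfold tgtsg
      rw [if_pos hidx, hget]
    by_cases hend : p ≤ sg[n-1].2.1
    · rw [htg, if_pos ⟨hstart, hend⟩]
      by_cases hk : sg[n-1].2.2 = k
      · have hhit : bHit sg[n-1] ((nexts sg)[n-1]'(by omega)) p = true := by
          rw [getElem_nexts sg (n-1) hn1 hlen]
          unfold bHit
          by_cases hlast : n - 1 + 1 < sg.length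
          · rw [dif_pos hlast]
            have := hge_gt (n-1+1) hlast (by omega)
            simp only [List.getElem_map] at this
            simp [hstart, hend, this]
          · rw [dif_neg hlast]
            simp [hstart, hend]
        have hany : (sg.zip (nexts sg)).any (fun gn => (gn.1.2.2 == k) && bHit gn.1 gn.2 p) = true := by
          rw [List.any_eq_true]
          refine ⟨(sg.zip (nexts sg))[n-1]'(by omega), List.getElem_mem _, ?_⟩
          rw [List.getElem_zip]
          simp [hk, hhit]
        simp [hany, hk]
      · have hany : (sg.zip (nexts sg)).any (fun gn => (gn.1.2.2 == k) && bHit gn.1 gn.2 p) = false := by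
          rw [List.any_eq_false]
          intro gn hgn
          obtain ⟨i, hilt, hieq⟩ := List.mem_iff_getElem.mp hgn
          have hisg : i < sg.length := by omega
          rw [List.getElem_zip] at hieq
          by_cases hhit : bHit sg[i] ((nexts sg)[i]'(by omega)) p = true
          · have hieq2 : i = n - 1 := (hit_index sg p hs i hisg hlen hhit).2
            subst hieq2
            simp [← hieq, hk]
          · simp [← hieq, Bool.eq_false_iff.mpr hhit]
        simp [hany, hk]
    · rw [htg, if_neg (by tauto)]
      have hany : (sg.zip (nexts sg)).any (fun gn => (gn.1.2.2 == k) && bHit gn.1 gn.2 p) = false := by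
        rw [List.any_eq_false]
        intro gn hgn
        obtain ⟨i, hilt, hieq⟩ := List.mem_iff_getElem.mp hgn
        have hisg : i < sg.length := by omega
        rw [List.getElem_zip] at hieq
        by_cases hhit : bHit sg[i] ((nexts sg)[i]'(by omega)) p = true
        · have h2 := (hit_index sg p hs i hisg hlen hhit).2
          subst h2
          rw [getElem_nexts sg (n-1) hn1 hlen] at hhit
          unfold bHit at hhit
          simp only [Bool.and_eq_true, decide_eq_true_eq] at hhit
          exact absurd hhit.1.2 hend
        · simp [← hieq, Bool.eq_false_iff.mpr hhit]
      simp [hany]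
  · have htg : tgtsg sg p = none := by
      unfold tgtsg
      rw [if_neg (by omega)]
    have hany : (sg.zip (nexts sg)).any (fun gn => (gn.1.2.2 == k) && bHit gn.1 gn.2 p) = false := by
      rw [List.any_eq_false]
      intro gn hgn
      obtain ⟨i, hilt, hieq⟩ := List.mem_iff_getElem.mp hgn
      have hisg : i < sg.length := by omega
      rw [List.getElem_zip] at hieq
      by_cases hhit : bHit sg[i] ((nexts sg)[i]'(by omega)) p = true
      · have := (hit_index sg p hs i hisg hlen hhit).1
        omega
      · simp [← hieq, Bool.eq_false_iff.mpr hhit]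
    simp [hany, htg]

-- at most one pair of the zip fires on any position
lemma zip_pairwise_disjoint (sg : List (Int × Int × String)) (k : String)
    (hs : sg.Pairwise (fun a b => a.1 ≤ b.1)) :
    (sg.zip (nexts sg)).Pairwise (fun y y' => ∀ x,
      ((y.1.2.2 == k) && bHit y.1 y.2 x) = true → ((y'.1.2.2 == k) && bHit y'.1 y'.2 x) = false) := by
  rw [List.pairwise_iff_getElem]
  intro i j hi hj hij x hx
  have hzlen : (sg.zip (nexts sg)).length = sg.length := length_zip_nexts sg
  have hlen : (nexts sg).length = sg.length := by
    cases sg with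
    | nil => exact absurd hi (by simp)
    | cons a t => exact length_nexts _ (by simp)
  have hisg : i < sg.length := by omega
  have hjsg : j < sg.length := by omega
  rw [List.getElem_zip] at hx ⊢
  rw [Bool.and_eq_true] at hx
  by_contra hcon
  rw [Bool.not_eq_false, Bool.and_eq_true] at hcon
  have h1 := (hit_index sg x hs i hisg hlen hx.2).2
  have h2 := (hit_index sg x hs j hjsg hlen hcon.2).2
  omega

-- tgt only returns gene ids of genes stored under the read's chromosome
lemma tgt_mem (gd : PySem.Dict String (List (Int × Int × String))) (r : String × Int) (k : String)
    (h : tgt gd r = some k) :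
    ∃ sg, gd.get? r.1 = some sg ∧ ∃ g ∈ sg, g.2.2 = k := by
  cases hg : gd.get? r.1 with
  | none =>
    unfold tgt at h
    rw [hg] at h
    exact absurd h (by simp)
  | some sg =>
    have h' : tgtsg sg r.2 = some k := by
      unfold tgt at h
      rw [hg] at h
      exact h
    refine ⟨sg, rfl, ?_⟩
    unfold tgtsg at h'
    split at h'
    · split at h'
      next => exact absurd h' (by simp)
      next g heq =>
        split at h'
        · exact ⟨g, PySem.List.mem_of_pyGet?_eq_some sg heq, by simpa using h'⟩
        · exact absurd h' (by simp)
    · exact absurd h' (by simp)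

-- per chromosome: B's per-gene sums are A's per-read count for gene id k
lemma chrom_count (reads : List (String × Int)) (c1 : String) (sg : List (Int × Int × String)) (k : String)
    (hs : sg.Pairwise (fun a b => a.1 ≤ b.1)) :
    ((sg.zip (nexts sg)).map (fun gn => if gn.1.2.2 = k then
        ((((reads.filter (fun r => r.1 == c1)).map (fun r => r.2)).countP (fun p => bHit gn.1 gn.2 p) : Nat) : Int) else 0)).sum
      = (reads.countP (fun r => (r.1 == c1) && (tgtsg sg r.2 == some k)) : Int) := by
  set positions := (reads.filter (fun r => r.1 == c1)).map (fun r => r.2) with hpos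
  have hstep1 : ∀ gn ∈ sg.zip (nexts sg),
      (if gn.1.2.2 = k then ((positions.countP (fun p => bHit gn.1 gn.2 p) : Nat) : Int) else 0) =
        (positions.countP (fun p => (gn.1.2.2 == k) && bHit gn.1 gn.2 p) : Int) := by
    intro gn _
    by_cases hk : gn.1.2.2 = k
    · rw [if_pos hk]
      congr 1
      exact List.countP_congr (fun p _ => by simp [hk])
    · rw [if_neg hk]
      have : positions.countP (fun p => (gn.1.2.2 == k) && bHit gn.1 gn.2 p) = 0 := by
        rw [List.countP_eq_zero]
        intro p _
        simp [hk]
      rw [this]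
      rfl
  rw [List.map_congr_left hstep1]
  rw [sum_countP_disjoint (sg.zip (nexts sg)) positions
        (fun gn p => (gn.1.2.2 == k) && bHit gn.1 gn.2 p) (zip_pairwise_disjoint sg k hs)]
  have hany : ∀ p, ((sg.zip (nexts sg)).any (fun gn => (gn.1.2.2 == k) && bHit gn.1 gn.2 p)) = (tgtsg sg p == some k) :=
    fun p => any_eq_tgtsg sg p k hs
  congr 1
  rw [List.countP_congr (fun p _ => by rw [hany p]), hpos, List.countP_map, List.countP_filter]
  exact List.countP_congr (fun r _ => by simp [Bool.and_comm])

-- splitting A's total count over the (distinct) chromosomes of the gene dict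
lemma countP_tgt_split (reads : List (String × Int)) (cgs : List (String × List (Int × Int × String)))
    (gd : PySem.Dict String (List (Int × Int × String))) (k : String)
    (hnodup : (cgs.map (fun cs => cs.1)).Nodup)
    (hcov : ∀ r : String × Int, (tgt gd r == some k) = true → r.1 ∈ cgs.map (fun cs => cs.1)) :
    (cgs.map (fun cs => (reads.countP (fun r => (r.1 == cs.1) && (tgt gd r == some k)) : Int))).sum
      = (reads.countP (fun r => tgt gd r == some k) : Int) := by
  have hpw : cgs.Pairwise (fun y y' => ∀ r : String × Int,
      ((r.1 == y.1) && (tgt gd r == some k)) = true → ((r.1 == y'.1) && (tgt gd r == some k)) = false) := by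
    have := (List.pairwise_map.mp (List.nodup_iff_pairwise_ne.mp hnodup : _))
    refine List.Pairwise.imp ?_ this
    intro y y' hne r hr
    rw [Bool.and_eq_true] at hr
    have : r.1 = y.1 := by simpa using hr.1
    simp [this, hne]
  rw [sum_countP_disjoint cgs reads _ hpw]
  congr 1
  refine List.countP_congr (fun r _ => ?_)
  by_cases ht : (tgt gd r == some k) = true
  · obtain ⟨cs, hcs, hcs1⟩ := List.mem_map.mp (hcov r ht)
    simp only [ht, iff_true, List.any_eq_true]
    exact ⟨cs, hcs, by simp [ht, hcs1]⟩
  · simp [Bool.eq_false_iff.mpr ht]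

-- B's chromosome loop, pointwise value
lemma foldl_bChrom_getD (reads : List (String × Int)) (cgs : List (String × List (Int × Int × String)))
    (c : PySem.Dict String Int) (k : String) :
    (cgs.foldl (bChrom reads) c).getD k 0 = c.getD k 0 +
      (cgs.map (fun cs => ((cs.2.zip (nexts cs.2)).map (fun gn => if gn.1.2.2 = k then
        ((((reads.filter (fun r => r.1 == cs.1)).map (fun r => r.2)).countP (fun p => bHit gn.1 gn.2 p) : Nat) : Int) else 0)).sum)).sum := by
  induction cgs generalizing c with
  | nil => simp
  | cons cs t ih =>
    rw [List.foldl_cons, List.map_cons, List.sum_cons, ih]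
    have hb : (bChrom reads c cs).getD k 0 = c.getD k 0 +
        ((cs.2.zip (nexts cs.2)).map (fun gn => if gn.1.2.2 = k then
          ((((reads.filter (fun r => r.1 == cs.1)).map (fun r => r.2)).countP (fun p => bHit gn.1 gn.2 p) : Nat) : Int) else 0)).sum := by
      unfold bChrom
      exact foldl_insert_add_getD _ _ _ _ _
    rw [hb]
    ring

-- B's chromosome loop preserves the key list
lemma foldl_bChrom_keys (reads : List (String × Int)) (cgs : List (String × List (Int × Int × String)))
    (c : PySem.Dict String Int)
    (hmem : ∀ cs ∈ cgs, ∀ g ∈ cs.2, g.2.2 ∈ c.keys) :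
    (cgs.foldl (bChrom reads) c).keys = c.keys := by
  induction cgs generalizing c with
  | nil => rfl
  | cons cs t ih =>
    rw [List.foldl_cons]
    have hkeys : (bChrom reads c cs).keys = c.keys := by
      unfold bChrom
      refine foldl_insert_add_keys _ _ _ _ (fun gn hgn => ?_)
      exact hmem cs List.mem_cons_self gn.1 (List.of_mem_zip (by simpa using hgn)).1
    rw [ih _ (fun cs' hcs' g hg => by rw [hkeys]; exact hmem cs' (List.mem_cons_of_mem _ hcs') g hg), hkeys]

-- both initialisations build the same dict of zeroed gene ids
lemma c0_helper (l : List (String × List (Int × Int × String))) (d : PySem.Dict String Int) :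
    l.foldl (fun c cg => (PySem.List.sorted cg.2 (fun g => g.1)).foldl (fun c g => c.insert g.2.2 (0 : Int)) c) d =
      ((l.map (fun cg => (cg.1, PySem.List.sorted cg.2 (fun g => g.1)))).flatMap
        (fun cs => cs.2.map (fun g => (g.2.2, (0 : Int))))).foldl (fun c p => c.insert p.1 p.2) d := by
  induction l generalizing d with
  | nil => rfl
  | cons x xs ih =>
    rw [List.map_cons, List.flatMap_cons, List.foldl_append, List.foldl_cons, ih]
    congr 1
    rw [List.foldl_map]

-- ===== VERDICT (by name: the statement is the Claim_ definition above) =====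
theorem count_reads_spec : Claim_equal_count_reads := by
  intro reads genes _
  show count_reads reads genes = count_reads_alt reads genes
  unfold count_reads count_reads_alt
  simp only []
  set l := (PySem.Dict.ofList genes).items with hl
  set cgs := l.map (fun cg => (cg.1, PySem.List.sorted cg.2 (fun g => g.1))) with hcgs
  set pairs := cgs.flatMap (fun cs => cs.2.map (fun g => (g.2.2, (0 : Int)))) with hpairs
  set c0 : PySem.Dict String Int := PySem.Dict.ofList pairs with hc0
  set stA : PySem.Dict String Int × PySem.Dict String (List Int) × PySem.Dict String (List (Int × Int × String)) :=
    (PySem.Dict.empty, PySem.Dict.empty, PySem.Dict.empty) with hstA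
  set P := l.foldl aPrep stA with hP
  -- the chromosome keys are distinct
  have hkeysl : (l.map (fun cg => cg.1)).Nodup := by
    have := PySem.Dict.nodup_keys_ofList genes
    simpa [PySem.Dict.keys, hl] using this
  have hcgs_fst : cgs.map (fun cs => cs.1) = l.map (fun cg => cg.1) := by
    rw [hcgs, List.map_map]
    rfl
  have hnodup_cgs : (cgs.map (fun cs => cs.1)).Nodup := by rw [hcgs_fst]; exact hkeysl
  -- gene_data is the dict of sorted gene lists
  have hgd : P.2.2 = PySem.Dict.ofList cgs := by
    rw [hP, aPrep_data, ofList_eq_foldl, hcgs, List.foldl_map]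
  -- counts starts out the same on both sides
  have hc0A : P.1 = c0 := by
    rw [hP, aPrep_fst, hc0, ofList_eq_foldl, hpairs, hcgs]
    exact c0_helper l stA.1
  -- the items of the gene dict are exactly the sorted chromosome list
  have hitems : (PySem.Dict.ofList cgs).items = cgs := by
    rw [ofList_eq_foldl]
    have := PySem.Dict.items_foldl_insert_fresh (l := cgs) (k := fun p => p.1) (v := fun p => p.2)
      (d := PySem.Dict.empty) (fun a _ => by simp) hnodup_cgs
    simpa using this
  have hnodup_gd : (PySem.Dict.ofList cgs).keys.Nodup := PySem.Dict.nodup_keys_ofList cgs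
  have hkeysgd : (PySem.Dict.ofList cgs).keys = cgs.map (fun cs => cs.1) := by
    simp only [PySem.Dict.keys, hitems]
  have hget : ∀ cs ∈ cgs, (PySem.Dict.ofList cgs).get? cs.1 = some cs.2 := by
    intro cs hcs
    exact PySem.Dict.get?_of_mem_items _ (by rw [hitems]; simpa using hcs) hnodup_gd
  -- membership in the initial counts dict
  have hc0keys : ∀ x, x ∈ c0.keys ↔ x ∈ pairs.map (fun p => p.1) := by
    intro x
    rw [hc0, ofList_eq_foldl]
    rw [PySem.Dict.keys_foldl_insert_key (l := pairs) (key := fun p => p.1) (f := fun _ p => p.2)]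
    simp [PySem.Set.update_nil_left, PySem.Set.mem_ofList]
  have hmempairs : ∀ cs ∈ cgs, ∀ g ∈ cs.2, g.2.2 ∈ c0.keys := by
    intro cs hcs g hg
    rw [hc0keys]
    exact List.mem_map.mpr ⟨(g.2.2, 0), List.mem_flatMap.mpr ⟨cs, hcs, List.mem_map.mpr ⟨g, hg, rfl⟩⟩, rfl⟩
  have hmemA : ∀ (r : String × Int) k, tgt (PySem.Dict.ofList cgs) r = some k → k ∈ c0.keys := by
    intro r k hr
    obtain ⟨sg, hsg, g, hgmem, hgid⟩ := tgt_mem _ _ _ hr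
    have hin : (r.1, sg) ∈ cgs := by
      rw [← hitems]
      exact PySem.Dict.mem_items_of_get?_eq_some _ hsg
    subst hgid
    exact hmempairs (r.1, sg) hin g hgmem
  -- every chromosome list is sorted by gene start
  have hsorted : ∀ cs ∈ cgs, cs.2.Pairwise (fun a b => a.1 ≤ b.1) := by
    intro cs hcs
    obtain ⟨cg, _, rfl⟩ := List.mem_map.mp hcs
    exact PySem.List.sorted_pairwise cg.2 (fun g => g.1)
  -- rewrite A's counting loop through tgt
  have hrel : ∀ c, P.2.1.get? c = (P.2.2.get? c).map (List.map (fun g => g.1)) := by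
    refine aPrep_starts_rel l stA (fun c => ?_)
    simp [hstA, PySem.Dict.get?_empty]
  have hA : reads.foldl (aStep P.2.1 P.2.2) P.1 =
      reads.foldl (fun counts r =>
        match tgt (PySem.Dict.ofList cgs) r with
        | none => counts
        | some k' => counts.insert k' (counts.getD k' 0 + 1)) c0 := by
    rw [hc0A]
    refine foldl_fun_ext _ _ reads c0 (fun acc r => ?_)
    rw [aStep_eq_tgt P.2.1 P.2.2 hrel acc r, hgd]
  rw [hA]
  -- keys agree with the initial dict on both sides
  have hnodup_c0 : c0.keys.Nodup := by rw [hc0]; exact PySem.Dict.nodup_keys_ofList pairs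
  have hkeysA : (reads.foldl (fun counts r =>
      match tgt (PySem.Dict.ofList cgs) r with
      | none => counts
      | some k' => counts.insert k' (counts.getD k' 0 + 1)) c0).keys = c0.keys :=
    foldl_bump_keys _ reads c0 hmemA
  have hkeysB : (cgs.foldl (bChrom reads) c0).keys = c0.keys :=
    foldl_bChrom_keys reads cgs c0 hmempairs
  -- pointwise values agree
  have hval : ∀ k, (reads.foldl (fun counts r =>
      match tgt (PySem.Dict.ofList cgs) r with
      | none => counts
      | some k' => counts.insert k' (counts.getD k' 0 + 1)) c0).getD k 0 =
      (cgs.foldl (bChrom reads) c0).getD k 0 := by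
    intro k
    rw [foldl_bump_getD, foldl_bChrom_getD]
    congr 1
    have hmapeq : ∀ cs ∈ cgs,
        ((cs.2.zip (nexts cs.2)).map (fun gn => if gn.1.2.2 = k then
          ((((reads.filter (fun r => r.1 == cs.1)).map (fun r => r.2)).countP (fun p => bHit gn.1 gn.2 p) : Nat) : Int) else 0)).sum =
        (reads.countP (fun r => (r.1 == cs.1) && (tgt (PySem.Dict.ofList cgs) r == some k)) : Int) := by
      intro cs hcs
      rw [chrom_count reads cs.1 cs.2 k (hsorted cs hcs)]
      congr 1
      refine List.countP_congr (fun r _ => ?_)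
      by_cases hc : r.1 = cs.1
      · have : tgt (PySem.Dict.ofList cgs) r = tgtsg cs.2 r.2 := by
          unfold tgt
          rw [hc, hget cs hcs]
        simp [hc, this]
      · simp [hc]
    rw [← countP_tgt_split reads cgs (PySem.Dict.ofList cgs) k hnodup_cgs ?hcov]
    case hcov =>
      intro r hr
      obtain ⟨sg, hsg, _⟩ := tgt_mem _ _ _ (by simpa using hr)
      have : r.1 ∈ (PySem.Dict.ofList cgs).keys := by
        by_contra hcon
        rw [← PySem.Dict.get?_eq_none_iff_not_mem_keys] at hcon
        rw [hcon] at hsg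
        cases hsg
      rwa [hkeysgd] at this
    rw [List.map_congr_left hmapeq]
  -- conclude: same keys, same values, hence the same items
  rw [PySem.Dict.items_eq_map_keys _ (by rw [hkeysA]; exact hnodup_c0) 0,
      PySem.Dict.items_eq_map_keys _ (by rw [hkeysB]; exact hnodup_c0) 0,
      hkeysA, hkeysB]
  exact List.map_congr_left (fun k _ => by rw [hval k])
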